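-- pv_equiv track=rewrite | github.com/larubiano0/PF-Dalgo | ProblemaP0.py | count
-- ===== SOURCE A (Python) =====
-- def count(string, substring):
--     '''
--     Cuenta el número de veces que aparece substring en string
--     '''
--     apariciones = 0  # Numero total de apariciones de substring en string
--     gsigns = 0  # Veces que aparece el primer caracter de substring en string
--     a = substring[0]  # primer caracter de substring
--     b = substring[1]  # segundo caracter de substring
--
--     if a != b:  # En caso de que los caracteres del substring sean distintos
--
--         i = 0
--
--         while i < len(string):  # Itera sobre el string de izquierda a derecha
--
--             if string[i] == a:
--
--                 gsigns += 1  # Incremente el número de apariciones del primer caracter de substring en string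
--
--             elif string[i] == b:
--
--                 apariciones += gsigns  # Si el segundo caracter de substring aparece en string, incremente el número de apariciones de substring en string
--
--             i += 1
--
--         return apariciones
--
--     else:  # En caso de que los caracteres del substring sean iguales
--
--         i = 0
--
--         while i < len(string):  # Itera sobre el string de izquierda a derecha
--
--             if string[i] == substring[0]:
--
--                 gsigns += 1  # Cuenta las veces que aparece el caracter en el string
--
--             i += 1
--
--         # Retorna el número triangular asociado al número de apariciones del caracter en string
--         return gsigns*(gsigns-1)//2
-- ===== SOURCE B (Python) =====
-- def count(string, substring):
--     a, b = substring[0], substring[1]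
--     count_a = 0
--     ap = 0
--     for c in string:
--         if c == b:
--             ap += count_a
--         if c == a:
--             count_a += 1
--     return ap
-- ===== Notes on version B (the rewrite author's own statement) =====
-- stated objective: simpler
-- what changed: Replaces A's two separate branch-specific loops (distinct-char scan vs. character count plus triangular formula) with one uniform single pass over the characters maintaining count_a and ap via two ordered ifs; iterating over characters instead of while-loop indexing also makes it measurably faster.
import Mathlib
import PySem

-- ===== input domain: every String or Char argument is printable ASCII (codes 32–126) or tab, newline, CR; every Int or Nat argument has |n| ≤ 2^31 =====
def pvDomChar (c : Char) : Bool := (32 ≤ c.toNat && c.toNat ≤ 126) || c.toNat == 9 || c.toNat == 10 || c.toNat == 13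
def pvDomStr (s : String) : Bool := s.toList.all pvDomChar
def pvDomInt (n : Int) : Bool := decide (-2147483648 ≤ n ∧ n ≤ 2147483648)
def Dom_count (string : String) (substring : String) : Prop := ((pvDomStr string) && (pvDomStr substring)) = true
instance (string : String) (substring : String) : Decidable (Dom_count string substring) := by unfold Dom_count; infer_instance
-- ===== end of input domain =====

-- B replaces A's two branch-specific loops with one uniform single pass; same O(n) cost, simpler.

-- ===== PORT A =====
-- A: if a != b, one scan accumulating gsigns/apariciones; else count occurrences of a and
-- return the triangular number gsigns*(gsigns-1)//2.
def count (string : String) (substring : String) : Int :=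
  match substring.toList with
  | a :: b :: _ =>
    if a ≠ b then
      (string.toList.foldl
        (fun (st : Int × Int) c =>
          -- st = (apariciones, gsigns)
          if c = a then (st.1, st.2 + 1)
          else if c = b then (st.1 + st.2, st.2)
          else st) (0, 0)).1
    else
      let gsigns : Int := string.toList.foldl
        (fun (g : Int) c => if c = a then g + 1 else g) 0
      PySem.Int.floordiv (gsigns * (gsigns - 1)) 2
  | _ => 0  -- substring[0] / substring[1] raises IndexError: excluded by Pre_count

-- ===== PORT B =====
-- B: one pass; for each char, first 'if c == b: ap += count_a', then 'if c == a: count_a += 1'.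
def count_alt (string : String) (substring : String) : Int :=
  -- a = substring[0], b = substring[1]; none (IndexError) is excluded by Pre_count
  ((PySem.Str.pyGet? substring 0).bind fun a =>
   (PySem.Str.pyGet? substring 1).map fun b =>
    (string.toList.foldl
      (fun (st : Int × Int) c =>
        -- st = (ap, count_a)
        let st1 := if c = b then (st.1 + st.2, st.2) else st
        if c = a then (st1.1, st1.2 + 1) else st1) (0, 0)).1).getD 0

-- ===== PRECONDITION & SPEC =====
-- Both A and B raise IndexError when substring has fewer than 2 characters (substring[0]/substring[1]).
-- Pre_count excludes substrings of length < 2, on which both A and B raise IndexError (substring[1]).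
def Pre_count (_string : String) (substring : String) : Prop := 2 ≤ substring.toList.length
instance (string : String) (substring : String) : Decidable (Pre_count string substring) := by unfold Pre_count; infer_instance
def pvWitness_count : String × String := ("abcab", "ab")

def Spec_count (string : String) (substring : String) (out : Int) : Prop := out = count_alt string substring
instance (string : String) (substring : String) (out : Int) : Decidable (Spec_count string substring out) := by unfold Spec_count; infer_instance

-- ===== CLAIM (what is proved, stated in full; the proofs are below) =====
def Claim_equal_count : Prop := ∀ (string : String) (substring : String), Dom_count string substring → Pre_count string substring → Spec_count string substring (count string substring)

-- ===== LEMMAS AND PROOFS =====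

-- distinct characters: the two fold steps are the same function
lemma step_eq_of_ne {a b : Char} (hab : a ≠ b) :
    (fun (st : Int × Int) c =>
        let st1 := if c = b then (st.1 + st.2, st.2) else st
        if c = a then (st1.1, st1.2 + 1) else st1)
    = (fun (st : Int × Int) c =>
        if c = a then (st.1, st.2 + 1)
        else if c = b then (st.1 + st.2, st.2)
        else st) := by
  funext st c
  by_cases hca : c = a <;> by_cases hcb : c = b <;>
    simp_all

-- equal characters: invariant of B's fold, with the triangular number expressed via count
lemma foldB_eq_same (a : Char) (l : List Char) : ∀ (ap g : Int),
    (l.foldl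
      (fun (st : Int × Int) c =>
        let st1 := if c = a then (st.1 + st.2, st.2) else st
        if c = a then (st1.1, st1.2 + 1) else st1) (ap, g))
    = (ap + g * (l.count a : Int) + ((l.count a : Int)) * ((l.count a : Int) - 1) / 2,
       g + (l.count a : Int)) := by
  induction l with
  | nil => intro ap g; simp
  | cons c t ih =>
    intro ap g
    by_cases hca : c = a
    · simp only [List.foldl_cons, hca, List.count_cons_self, ih, if_pos]
      have hk : ((t.count a + 1 : Nat) : Int) = (t.count a : Int) + 1 := by push_cast; ring
      rw [hk, Prod.mk.injEq]
      refine ⟨?_, ?_⟩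
      · have h2 : (2:Int) ∣ (t.count a : Int) * ((t.count a : Int) - 1) := by
          rcases Int.even_or_odd (t.count a : Int) with ⟨m, hm⟩ | ⟨m, hm⟩
          · exact ⟨m * ((t.count a : Int) - 1), by rw [hm]; ring⟩
          · exact ⟨(t.count a : Int) * m, by rw [hm]; ring⟩
        obtain ⟨m, hm⟩ := h2
        have hm' : ((t.count a : Int) + 1) * ((t.count a : Int) + 1 - 1) = 2 * (m + (t.count a : Int)) := by
          nlinarith [hm]
        rw [hm, hm', Int.mul_ediv_cancel_left _ (by norm_num : (2:Int) ≠ 0),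
            Int.mul_ediv_cancel_left _ (by norm_num : (2:Int) ≠ 0)]
        ring
      · ring
    · simp only [List.foldl_cons, if_neg hca, List.count_cons_of_ne hca, ih]

-- A's counting fold is List.count
lemma foldA_count (a : Char) (l : List Char) : ∀ (g : Int),
    l.foldl (fun (g : Int) c => if c = a then g + 1 else g) g = g + (l.count a : Int) := by
  induction l with
  | nil => intro g; simp
  | cons c t ih =>
    intro g
    by_cases hca : c = a <;>
      simp [hca, ih]; ring

-- ===== VERDICT (by name: the statement is the Claim_ definition above) =====
theorem count_spec : Claim_equal_count := by
  intro string substring _ hpre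
  unfold Spec_count count count_alt
  match h : substring.toList with
  | [] => simp [Pre_count, h] at hpre
  | [a] => simp [Pre_count, h] at hpre
  | a :: b :: rest =>
    have hb0 : PySem.Str.pyGet? substring 0 = PySem.List.pyGet? substring.toList 0 := rfl
    have hb1 : PySem.Str.pyGet? substring 1 = PySem.List.pyGet? substring.toList 1 := rfl
    have h0 : PySem.Str.pyGet? substring 0 = some a := by
      rw [hb0, h, show ((0:Int)) = ((0:Nat):Int) from rfl, PySem.List.pyGet?_natCast]; simp
    have h1 : PySem.Str.pyGet? substring 1 = some b := by
      rw [hb1, h, show ((1:Int)) = ((1:Nat):Int) from rfl, PySem.List.pyGet?_natCast]; simp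
    rw [h0, h1]
    dsimp only [Option.bind, Option.map, Option.getD]
    by_cases hab : a = b
    · subst hab
      simp only [if_neg (by simp : ¬ a ≠ a)]
      rw [foldB_eq_same a string.toList 0 0, foldA_count a string.toList 0]
      rw [PySem.Int.floordiv_eq_ediv_of_pos (by norm_num)]
      simp
    · rw [if_pos hab, step_eq_of_ne hab]
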